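-- pv_equiv track=rewrite | github.com/X-jun-0130/Large-Multimodal-Model | data_proess.py | get_mt
-- ===== SOURCE A (Python) =====
-- end_token = '</s>'
--
-- def get_mt(ins_list, max_len=600):
--     instructions_list = []
--     for mt in ins_list:
--         if 'User:' in mt[-1][:6]:
--             mt = mt[:-1]
--         chunk_token = end_token+'\n '
--
--         dd_s = chunk_token.join(mt) + end_token
--
--         if len(dd_s) <= max_len:
--             pass
--         else:
--             while len(dd_s) > max_len:
--                 mt = mt[:-2]
--                 dd_s = chunk_token.join(mt) + end_token
--         dd_s = dd_s.replace('User:', 'User: ').replace('\n Assistant:', '\n Assistant: ')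
--         instructions_list.append(dd_s)
--     return instructions_list
-- ===== SOURCE B (Python) =====
-- end_token = '</s>'
--
-- def _fit_count(mt, max_len):
--     # prefix sums of element lengths; joined length of first k chunks is
--     # pref[k] + 6*k - 2 for k >= 1 (separator '</s>\n ' is 6 chars, suffix '</s>' is 4)
--     pref = [0]
--     for s in mt:
--         pref.append(pref[-1] + len(s))
--     k = len(mt)
--     while k > 0 and pref[k] + 6 * k - 2 > max_len:
--         k -= 2
--     return max(k, 0)
--
-- def get_mt(ins_list, max_len=600):
--     rows = []
--     for mt in ins_list:
--         if 'User:' in mt[-1][:6]: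
--             mt = mt[:-1]
--         k = _fit_count(mt, max_len)
--         dd = ('</s>\n '.join(mt[:k]) + end_token)
--         rows.append(dd.replace('User:', 'User: ').replace('\n Assistant:', '\n Assistant: '))
--     return rows
-- ===== Notes on version B (the rewrite author's own statement) =====
-- stated objective: alternative
-- what changed: Instead of repeatedly re-joining the chunk list and re-measuring the string after each 2-element trim, B computes prefix sums of chunk lengths once, finds the fitting chunk count of the right parity by integer arithmetic, and joins once per row.
import Mathlib
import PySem

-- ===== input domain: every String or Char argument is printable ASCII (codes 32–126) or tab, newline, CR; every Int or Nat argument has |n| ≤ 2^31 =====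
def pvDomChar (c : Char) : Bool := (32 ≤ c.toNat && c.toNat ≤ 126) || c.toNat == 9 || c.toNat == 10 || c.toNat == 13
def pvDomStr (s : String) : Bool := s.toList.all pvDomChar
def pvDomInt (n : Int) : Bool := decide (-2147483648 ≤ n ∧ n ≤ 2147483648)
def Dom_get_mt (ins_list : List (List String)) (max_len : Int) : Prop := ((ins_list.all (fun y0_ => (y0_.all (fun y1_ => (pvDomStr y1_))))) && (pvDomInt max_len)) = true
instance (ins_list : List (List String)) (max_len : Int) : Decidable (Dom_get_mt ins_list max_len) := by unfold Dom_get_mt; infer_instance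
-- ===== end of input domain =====

-- B replaces A's re-join-and-remeasure trimming loop by prefix sums of chunk lengths,
-- finds the fitting chunk count arithmetically and joins once per row (objective: alternative).

-- ===== PORT A =====

-- chunk_token.join(mt) + end_token  (shared by both Pythons verbatim)
def pvJoin (mt : List String) : String :=
  PySem.Str.join "</s>\n " mt ++ "</s>"

-- A's `while len(dd_s) > max_len:` loop, entered with the condition true.
-- For mt = [] the Python loop never terminates (dd_s stays "</s>"); that case is
-- outside Pre_get_mt, the guard just returns the current string to stay total.
def pvWhileA (max_len : Int) : List String → String
  | [] => pvJoin []
  | x :: rest =>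
    let mt' := PySem.List.slice (x :: rest) none (some (-2))   -- mt = mt[:-2]
    let dd := pvJoin mt'
    if max_len < PySem.Str.len dd then pvWhileA max_len mt' else dd
termination_by mt => mt.length
decreasing_by
  simp only [PySem.List.slice_to_neg_ofNat (x :: rest) 2 (by omega), List.length_take,
    List.length_cons]
  omega

-- the body of A's `for mt in ins_list` loop; mt0 = [] raises IndexError (outside Pre_get_mt)
def pvRowA (max_len : Int) (mt0 : List String) : String :=
  let mt := if PySem.Str.isIn "User:"
      (PySem.Str.slice ((PySem.List.pyGet? mt0 (-1)).getD "") none (some 6))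
    then PySem.List.slice mt0 none (some (-1)) else mt0
  let dd := pvJoin mt
  let dd := if PySem.Str.len dd ≤ max_len then dd else pvWhileA max_len mt
  PySem.Str.replace (PySem.Str.replace dd "User:" "User: ") "\n Assistant:" "\n Assistant: "

def get_mt (ins_list : List (List String)) (max_len : Int) : List String :=
  ins_list.foldl (fun acc mt => acc ++ [pvRowA max_len mt]) []

-- ===== PORT B =====

-- pref = [0]; for s in mt: pref.append(pref[-1] + len(s))
def pvPrefix (mt : List String) : List Int :=
  mt.foldl (fun pref s => pref ++ [pref.getLast?.getD 0 + PySem.Str.len s]) [0]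

-- while k > 0 and pref[k] + 6*k - 2 > max_len: k -= 2
def pvFitLoop (pref : List Int) (max_len : Int) (k : Int) : Int :=
  if 0 < k ∧ max_len < pref.getD k.toNat 0 + 6 * k - 2 then pvFitLoop pref max_len (k - 2) else k
termination_by k.toNat
decreasing_by omega

def pvFitCount (mt : List String) (max_len : Int) : Int :=
  max (pvFitLoop (pvPrefix mt) max_len (mt.length : Int)) 0

-- one row of B: trim count by arithmetic, then a single join
def pvRowB (max_len : Int) (mt0 : List String) : String :=
  let mt := if PySem.Str.isIn "User:"
      (PySem.Str.slice ((PySem.List.pyGet? mt0 (-1)).getD "") none (some 6))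
    then PySem.List.slice mt0 none (some (-1)) else mt0
  let k := pvFitCount mt max_len
  let dd := PySem.Str.join "</s>\n " (PySem.List.slice mt none (some k)) ++ "</s>"
  PySem.Str.replace (PySem.Str.replace dd "User:" "User: ") "\n Assistant:" "\n Assistant: "

def get_mt_alt (ins_list : List (List String)) (max_len : Int) : List String :=
  ins_list.foldl (fun rows mt => rows ++ [pvRowB max_len mt]) []

-- ===== PRECONDITION & SPEC =====
-- Pre_ excludes exactly the inputs where Python A does not return: an empty conversation
-- (mt[-1] raises IndexError) and max_len < 4 with a nonempty list (even the fully trimmed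
-- row "</s>" has length 4, so the while loop never exits).
def Pre_get_mt (ins_list : List (List String)) (max_len : Int) : Prop :=
  (∀ mt ∈ ins_list, mt ≠ []) ∧ (ins_list = [] ∨ 4 ≤ max_len)
instance (ins_list : List (List String)) (max_len : Int) : Decidable (Pre_get_mt ins_list max_len) := by unfold Pre_get_mt; infer_instance

def pvWitness_get_mt : List (List String) × Int := ([["User: hi", "ok"]], 10)

def Spec_get_mt (ins_list : List (List String)) (max_len : Int) (out : List String) : Prop := out = get_mt_alt ins_list max_len
instance (ins_list : List (List String)) (max_len : Int) (out : List String) : Decidable (Spec_get_mt ins_list max_len out) := by unfold Spec_get_mt; infer_instance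

-- ===== CLAIM (what is proved, stated in full; the proofs are below) =====
def Claim_equal_get_mt : Prop := ∀ (ins_list : List (List String)) (max_len : Int), Dom_get_mt ins_list max_len → Pre_get_mt ins_list max_len → Spec_get_mt ins_list max_len (get_mt ins_list max_len)

-- ===== LEMMAS AND PROOFS =====

-- canonical trim count: largest k of the right parity whose joined prefix fits
def chooseK (max_len : Int) (mt : List String) (k : Nat) : Nat :=
  if 0 < k ∧ max_len < PySem.Str.len (pvJoin (mt.take k)) then chooseK max_len mt (k - 2) else k
termination_by k
decreasing_by omega

lemma len_join_chars (sep : List Char) (ps : List (List Char)) :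
    (PySem.Chars.join sep ps).length = (ps.map List.length).sum + sep.length * (ps.length - 1) := by
  induction ps with
  | nil => simp [PySem.Chars.join_nil]
  | cons p t ih =>
    cases t with
    | nil => simp [PySem.Chars.join_singleton]
    | cons q r =>
      rw [PySem.Chars.join_cons_cons]
      simp only [List.length_append, ih, List.map_cons, List.sum_cons, List.length_cons]
      simp only [Nat.add_sub_cancel, Nat.mul_succ]
      omega

lemma sum_len_cast (mt : List String) :
    (mt.map PySem.Str.len).sum = (((mt.map String.toList).map List.length).sum : Nat) := by
  rw [Nat.cast_list_sum, List.map_map, List.map_map]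
  exact congrArg List.sum (List.map_congr_left (fun s _ => by simp [PySem.Str.len_eq]))

lemma len_pvJoin (mt : List String) (h : mt ≠ []) :
    PySem.Str.len (pvJoin mt) = (mt.map PySem.Str.len).sum + 6 * (mt.length : Int) - 2 := by
  have hn : 1 ≤ mt.length := List.length_pos_iff.mpr h
  rw [pvJoin, PySem.Str.len_append, PySem.Str.len_eq, PySem.Str.len_eq, PySem.Str.toList_join,
    len_join_chars, sum_len_cast]
  simp only [List.length_map]
  have h6 : ("</s>\n ".toList).length = 6 := rfl
  have h4 : ("</s>".toList).length = 4 := rfl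
  rw [h6, h4]
  omega

lemma len_pvJoin_nil : PySem.Str.len (pvJoin []) = 4 := by decide

lemma pref_general (mt : List String) :
    ∀ (acc : List Int) (a : Int),
      List.foldl (fun pref s => pref ++ [pref.getLast?.getD 0 + PySem.Str.len s]) (acc ++ [a]) mt
      = acc ++ (List.range (mt.length + 1)).map (fun i => a + ((mt.take i).map PySem.Str.len).sum) := by
  induction mt with
  | nil => intro acc a; simp
  | cons s t ih =>
    intro acc a
    rw [List.foldl_cons]
    have h1 : (acc ++ [a]) ++ [(acc ++ [a]).getLast?.getD 0 + PySem.Str.len s]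
        = (acc ++ [a]) ++ [a + PySem.Str.len s] := by simp
    have h2 := ih (acc ++ [a]) (a + PySem.Str.len s)
    rw [h1, h2]
    rw [List.length_cons, List.range_succ_eq_map]
    simp only [List.map_cons, List.map_map, List.take_zero, List.map_nil,
      List.sum_nil, add_zero, List.append_assoc, List.singleton_append]
    rw [show t.length + 2 = (t.length + 1) + 1 from rfl, List.range_succ_eq_map,
      List.range_succ_eq_map]
    simp [List.map_map, Function.comp_def, add_assoc]

lemma pref_getD (mt : List String) (k : Nat) (hk : k ≤ mt.length) :
    (pvPrefix mt).getD k 0 = ((mt.take k).map PySem.Str.len).sum := by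
  have h := pref_general mt [] 0
  simp only [List.nil_append] at h
  rw [pvPrefix, h]
  rw [List.getD_eq_getElem?_getD, List.getElem?_map, List.getElem?_range (by omega : k < mt.length + 1)]
  simp

-- value of the joined prefix length, for 1 ≤ k ≤ mt.length
lemma len_pvJoin_take (mt : List String) (k : Nat) (h1 : 1 ≤ k) (hk : k ≤ mt.length) :
    PySem.Str.len (pvJoin (mt.take k)) = (pvPrefix mt).getD k 0 + 6 * (k : Int) - 2 := by
  have hne : mt.take k ≠ [] := by
    simp only [ne_eq, List.take_eq_nil_iff]
    rintro (rfl | rfl)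
    · omega
    · simp at hk
      omega
  rw [len_pvJoin _ hne, pref_getD mt k hk, List.length_take, Nat.min_eq_left hk]

lemma chooseK_le (max_len : Int) (mt : List String) (k : Nat) : chooseK max_len mt k ≤ k := by
  induction k using Nat.strong_induction_on with
  | _ k ih =>
    rw [chooseK]
    split_ifs with h
    · exact le_trans (ih (k - 2) (by omega)) (by omega)
    · exact le_refl k

lemma chooseK_take (max_len : Int) (mt : List String) (j : Nat) :
    ∀ k : Nat, k ≤ j → chooseK max_len (mt.take j) k = chooseK max_len mt k := by
  intro k
  induction k using Nat.strong_induction_on with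
  | _ k ih =>
    intro hkj
    conv_lhs => rw [chooseK]
    conv_rhs => rw [chooseK]
    rw [List.take_take, Nat.min_eq_left hkj]
    split_ifs with h
    · exact ih (k - 2) (by omega) (by omega)
    · rfl

-- B's loop result, clamped at 0, is the canonical trim count
lemma fit_eq (mt : List String) (max_len : Int) :
    ∀ k : Nat, k ≤ mt.length →
      (max (pvFitLoop (pvPrefix mt) max_len (k : Int)) 0).toNat = chooseK max_len mt k := by
  intro k
  induction k using Nat.strong_induction_on with
  | _ k ih =>
    intro hk
    rcases Nat.eq_zero_or_pos k with hk0 | hk1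
    · subst hk0
      conv_lhs => rw [pvFitLoop]
      conv_rhs => rw [chooseK]
      norm_num
    · conv_lhs => rw [pvFitLoop]
      conv_rhs => rw [chooseK]
      have hcond : (0 < (k : Int) ∧ max_len < (pvPrefix mt).getD ((k : Int)).toNat 0 + 6 * (k : Int) - 2)
          ↔ (0 < k ∧ max_len < PySem.Str.len (pvJoin (mt.take k))) := by
        rw [len_pvJoin_take mt k hk1 hk, Int.toNat_natCast]
        constructor
        · rintro ⟨-, h2⟩; exact ⟨hk1, h2⟩
        · rintro ⟨-, h2⟩; exact ⟨by exact_mod_cast hk1, h2⟩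
      split_ifs with hA hB hB
      · -- both recurse
        rcases Nat.lt_or_ge k 2 with h2 | h2
        · -- k = 1 : Int side reaches -1, Nat side reaches 0
          have hk1' : k = 1 := by omega
          subst hk1'
          conv_lhs => rw [pvFitLoop]
          norm_num
          conv_rhs => rw [chooseK]
          norm_num
        · rw [show (k : Int) - 2 = ((k - 2 : Nat) : Int) by omega]
          exact ih (k - 2) (by omega) (by omega)
      · exact absurd (hcond.mp hA) hB
      · exact absurd (hcond.mpr hB) hA
      · -- both stop at k
        rw [Int.max_eq_left (by positivity), Int.toNat_natCast]

-- A's if/while trimming computes the join of the canonical prefix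
lemma A_loop (max_len : Int) (h4 : 4 ≤ max_len) :
    ∀ mt : List String,
      (if PySem.Str.len (pvJoin mt) ≤ max_len then pvJoin mt else pvWhileA max_len mt)
      = pvJoin (mt.take (chooseK max_len mt mt.length)) := by
  intro mt
  induction hn : mt.length using Nat.strong_induction_on generalizing mt with
  | _ n ih =>
    subst hn
    by_cases hfit : PySem.Str.len (pvJoin mt) ≤ max_len
    · rw [if_pos hfit]
      have hneg : ¬(0 < mt.length ∧ max_len < PySem.Str.len (pvJoin (mt.take mt.length))) := by
        rw [List.take_length]
        rintro ⟨-, hlt⟩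
        omega
      conv_rhs => rw [chooseK]
      rw [if_neg hneg, List.take_length]
    · rw [not_le] at hfit
      rw [if_neg (by omega)]
      cases mt with
      | nil =>
        exfalso
        rw [len_pvJoin_nil] at hfit
        omega
      | cons x rest =>
        rw [pvWhileA]
        simp only [PySem.List.slice_to_neg_ofNat (x :: rest) 2 (by omega)]
        have hswap :
            (if max_len < PySem.Str.len (pvJoin ((x :: rest).take ((x :: rest).length - 2)))
              then pvWhileA max_len ((x :: rest).take ((x :: rest).length - 2))
              else pvJoin ((x :: rest).take ((x :: rest).length - 2)))
            = (if PySem.Str.len (pvJoin ((x :: rest).take ((x :: rest).length - 2))) ≤ max_len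
              then pvJoin ((x :: rest).take ((x :: rest).length - 2))
              else pvWhileA max_len ((x :: rest).take ((x :: rest).length - 2))) := by
          by_cases hc : PySem.Str.len (pvJoin ((x :: rest).take ((x :: rest).length - 2))) ≤ max_len
          · rw [if_pos hc, if_neg (by omega)]
          · rw [if_neg hc, if_pos (by omega)]
        rw [hswap]
        have hlen' : ((x :: rest).take ((x :: rest).length - 2)).length = (x :: rest).length - 2 := by
          rw [List.length_take]
          omega
        rw [ih ((x :: rest).take ((x :: rest).length - 2)).length
          (by rw [hlen']; simp) _ rfl]
        rw [hlen', chooseK_take max_len (x :: rest) ((x :: rest).length - 2) _ le_rfl,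
          List.take_take, Nat.min_eq_left (chooseK_le max_len (x :: rest) ((x :: rest).length - 2))]
        conv_rhs => rw [chooseK]
        rw [if_pos ⟨by simp, by rw [List.take_length]; exact hfit⟩]

lemma row_eq (max_len : Int) (h4 : 4 ≤ max_len) (mt0 : List String) :
    pvRowA max_len mt0 = pvRowB max_len mt0 := by
  simp only [pvRowA, pvRowB, pvFitCount]
  generalize (if PySem.Str.isIn "User:"
      (PySem.Str.slice ((PySem.List.pyGet? mt0 (-1)).getD "") none (some 6))
    then PySem.List.slice mt0 none (some (-1)) else mt0) = mt
  rw [A_loop max_len h4 mt, PySem.List.slice_to _ (le_max_right _ 0),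
    fit_eq mt max_len mt.length le_rfl, pvJoin]

-- ===== VERDICT (by name: the statement is the Claim_ definition above) =====
theorem get_mt_spec : Claim_equal_get_mt := by
  intro ins_list max_len _ hpre
  obtain ⟨-, hml⟩ := hpre
  show get_mt ins_list max_len = get_mt_alt ins_list max_len
  rw [get_mt, get_mt_alt, PySem.List.foldl_append_singleton_eq_map,
    PySem.List.foldl_append_singleton_eq_map]
  rcases hml with rfl | h4
  · simp
  · simp only [List.nil_append]
    exact List.map_congr_left fun mt _ => row_eq max_len h4 mt
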